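-- pv_equiv track=rewrite | github.com/amenkes319/PDM-16 | main.py | combineQuotedArgs
-- ===== SOURCE A (Python) =====
-- def combineQuotedArgs(args):
--     newArgs = []
--     i = 0
--     while i < len(args):
--         if args[i][0] == '"' and args[i][-1] != '"':
--             j = i + 1
--             while j < len(args) and args[j][-1] != '"':
--                 j += 1
--             combinedArg = " ".join(args[i:j+1])
--             newArgs.append(combinedArg[1:-1] if combinedArg.startswith('"') and combinedArg.endswith('"') else combinedArg)
--             i = j + 1
--         else:
--             newArgs.append(args[i])
--             i += 1
--     return newArgs
-- ===== SOURCE B (Python) =====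
-- def combineQuotedArgs(args):
--     newArgs = []
--     buffer = None
--     for arg in args:
--         if buffer is None:
--             if arg[0] == '"' and arg[-1] != '"':
--                 buffer = [arg]
--             else:
--                 newArgs.append(arg)
--         else:
--             buffer.append(arg)
--             if arg[-1] == '"':
--                 s = " ".join(buffer)
--                 newArgs.append(s[1:-1] if s.startswith('"') and s.endswith('"') else s)
--                 buffer = None
--     if buffer is not None:
--         s = " ".join(buffer)
--         newArgs.append(s[1:-1] if s.startswith('"') and s.endswith('"') else s)
--     return newArgs
-- ===== Notes on version B (the rewrite author's own statement) =====
-- stated objective: alternative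
-- what changed: Replaced the index-jumping nested while loops (inner scan, then a re-slice and join of the already-scanned range) by a single flat for-loop over the tokens that maintains a buffer accumulator (None outside a quoted run), with one flush after the loop for an unterminated run.
import Mathlib
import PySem

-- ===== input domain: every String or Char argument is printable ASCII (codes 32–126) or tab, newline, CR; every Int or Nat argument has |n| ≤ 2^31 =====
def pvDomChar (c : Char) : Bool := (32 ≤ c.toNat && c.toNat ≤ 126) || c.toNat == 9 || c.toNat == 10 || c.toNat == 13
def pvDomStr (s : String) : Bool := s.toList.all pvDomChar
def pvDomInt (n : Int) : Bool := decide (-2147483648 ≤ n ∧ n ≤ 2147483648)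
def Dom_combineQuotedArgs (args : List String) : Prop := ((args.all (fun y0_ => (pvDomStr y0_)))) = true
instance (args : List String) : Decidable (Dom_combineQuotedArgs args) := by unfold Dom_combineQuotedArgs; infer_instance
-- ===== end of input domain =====

-- B replaces A's index-jumping nested while loops by one flat pass with a buffer accumulator; return values proved equal on all lists of nonempty tokens (both raise on empty tokens).

-- shared helpers: these expressions appear verbatim in both Pythons
-- arg[0] == '"'  (Python raises on ""; Pre_ excludes that, the port returns false there)
def pvHeadQuote (s : String) : Bool := PySem.Str.pyGet? s 0 == some '"'
-- arg[-1] == '"'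
def pvLastQuote (s : String) : Bool := PySem.Str.pyGet? s (-1) == some '"'
-- " ".join(parts)
def pvJoin (parts : List String) : String := PySem.Str.join " " parts
-- s[1:-1] if s.startswith('"') and s.endswith('"') else s
def pvStrip (s : String) : String :=
  if PySem.Str.startswith s "\"" && PySem.Str.endswith s "\"" then
    PySem.Str.slice s (some 1) (some (-1))
  else s

-- ===== PORT A =====
-- inner while: j starting at i+1, advance while j < len(args) and args[j][-1] != '"'
-- (the while loops are ported with a fuel argument, always called with sufficient fuel args.length)
def pvScanA (args : List String) (fuel : Nat) (j : Nat) : Nat :=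
  match fuel with
  | 0 => j
  | f + 1 =>
    if j < args.length ∧ ¬ (pvLastQuote (args.getD j "") = true) then pvScanA args f (j + 1)
    else j

def pvLoopA (args : List String) (fuel : Nat) (i : Nat) : List String :=
  match fuel with
  | 0 => []
  | f + 1 =>
    if i < args.length then
      if pvHeadQuote (args.getD i "") && !(pvLastQuote (args.getD i "")) then
        let j := pvScanA args args.length (i + 1)
        pvStrip (pvJoin (PySem.List.slice args (some (i : Int)) (some ((j : Int) + 1)))) ::
          pvLoopA args f (j + 1)
      else
        args.getD i "" :: pvLoopA args f (i + 1)
    else []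

def combineQuotedArgs (args : List String) : List String := pvLoopA args args.length 0

-- ===== PORT B =====
-- flat pass with a buffer (None outside a quoted run), flushed once after the loop
def pvLoopB (args : List String) (buf : Option (List String)) : List String :=
  match args, buf with
  | [], none => []
  | [], some b => [pvStrip (pvJoin b)]
  | a :: rest, none =>
      if pvHeadQuote a && !(pvLastQuote a) then pvLoopB rest (some [a])
      else a :: pvLoopB rest none
  | a :: rest, some b =>
      if pvLastQuote a then pvStrip (pvJoin (b ++ [a])) :: pvLoopB rest none
      else pvLoopB rest (some (b ++ [a]))

def combineQuotedArgs_alt (args : List String) : List String := pvLoopB args none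

-- ===== PRECONDITION & SPEC =====
-- Pre_ excludes lists containing an empty-string token: Python A raises IndexError on "" (args[i][0] / args[j][-1]); B raises there too.
def Pre_combineQuotedArgs (args : List String) : Prop := ∀ s ∈ args, s.toList ≠ []
instance (args : List String) : Decidable (Pre_combineQuotedArgs args) := by
  unfold Pre_combineQuotedArgs; infer_instance

def pvWitness_combineQuotedArgs : List String := ["a"]

def Spec_combineQuotedArgs (args : List String) (out : List String) : Prop := out = combineQuotedArgs_alt args
instance (args : List String) (out : List String) : Decidable (Spec_combineQuotedArgs args out) := by unfold Spec_combineQuotedArgs; infer_instance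

-- ===== CLAIM (what is proved, stated in full; the proofs are below) =====
def Claim_equal_combineQuotedArgs : Prop := ∀ (args : List String), Dom_combineQuotedArgs args → Pre_combineQuotedArgs args → Spec_combineQuotedArgs args (combineQuotedArgs args)

-- ===== LEMMAS AND PROOFS =====

theorem pvScanA_stop (args : List String) (f j : Nat) (h : ¬ j < args.length) :
    pvScanA args f j = j := by
  cases f with
  | zero => rfl
  | succ f => rw [pvScanA]; simp [h]

theorem pvScanA_ge (args : List String) (f j : Nat) : j ≤ pvScanA args f j := by
  induction f generalizing j with
  | zero => exact le_refl j
  | succ f ih =>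
    rw [pvScanA]
    split
    · exact le_trans (Nat.le_succ j) (ih (j + 1))
    · exact le_refl j

theorem pvScanA_fuel (args : List String) (f1 : Nat) : ∀ (f2 j : Nat),
    args.length - j ≤ f1 → args.length - j ≤ f2 → pvScanA args f1 j = pvScanA args f2 j := by
  induction f1 with
  | zero =>
    intro f2 j h1 _
    have hj : ¬ j < args.length := by omega
    rw [pvScanA_stop args 0 j hj, pvScanA_stop args f2 j hj]
  | succ f ih =>
    intro f2 j h1 h2
    by_cases hj : j < args.length
    · obtain ⟨f2', rfl⟩ : ∃ f2', f2 = f2' + 1 := ⟨f2 - 1, by omega⟩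
      rw [pvScanA, pvScanA]
      by_cases hc : j < args.length ∧ ¬ (pvLastQuote (args.getD j "") = true)
      · rw [if_pos hc, if_pos hc]
        exact ih f2' (j + 1) (by omega) (by omega)
      · rw [if_neg hc, if_neg hc]
    · rw [pvScanA_stop args _ j hj, pvScanA_stop args f2 j hj]

theorem pvLoopA_nil (args : List String) (f i : Nat) (h : ¬ i < args.length) :
    pvLoopA args f i = [] := by
  cases f with
  | zero => rfl
  | succ f => rw [pvLoopA]; simp [h]

theorem pvLoopA_fuel (args : List String) (f1 : Nat) : ∀ (f2 i : Nat),
    args.length - i ≤ f1 → args.length - i ≤ f2 → pvLoopA args f1 i = pvLoopA args f2 i := by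
  induction f1 with
  | zero =>
    intro f2 i h1 _
    have hi : ¬ i < args.length := by omega
    rw [pvLoopA_nil args 0 i hi, pvLoopA_nil args f2 i hi]
  | succ f ih =>
    intro f2 i h1 h2
    by_cases hi : i < args.length
    · obtain ⟨f2', rfl⟩ : ∃ f2', f2 = f2' + 1 := ⟨f2 - 1, by omega⟩
      rw [pvLoopA, pvLoopA]
      simp only [if_pos hi]
      by_cases hc : (pvHeadQuote (args.getD i "") && !(pvLastQuote (args.getD i ""))) = true
      · rw [if_pos hc, if_pos hc]
        have hge := pvScanA_ge args args.length (i + 1)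
        rw [ih f2' (pvScanA args args.length (i + 1) + 1) (by omega) (by omega)]
      · rw [if_neg hc, if_neg hc]
        rw [ih f2' (i + 1) (by omega) (by omega)]
    · rw [pvLoopA_nil args _ i hi, pvLoopA_nil args f2 i hi]

-- one step of the inner while at an index inside the list
theorem pvScanA_step (args : List String) (k : Nat) (hk : k < args.length) :
    pvScanA args args.length k =
      if pvLastQuote (args.getD k "") = true then k else pvScanA args args.length (k + 1) := by
  obtain ⟨m, hm⟩ : ∃ m, args.length = m + 1 := ⟨args.length - 1, by omega⟩
  conv_lhs => rw [hm, pvScanA]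
  by_cases hq : pvLastQuote (args.getD k "") = true
  · rw [if_pos hq, if_neg (fun h => h.2 hq)]
  · rw [if_neg hq, if_pos ⟨hk, hq⟩]
    exact pvScanA_fuel args m args.length (k + 1) (by omega) (by omega)

-- joint invariant: A's index loop vs B's buffer loop, by induction on a bound for the remaining length
theorem pv_main (args : List String) (n : Nat) : ∀ (k : Nat), args.length - k ≤ n →
    (∀ f : Nat, args.length - k ≤ f → pvLoopA args f k = pvLoopB (args.drop k) none) ∧
    (∀ buf : List String,
      pvLoopB (args.drop k) (some buf) =
        pvStrip (pvJoin (buf ++ (args.drop k).take (pvScanA args args.length k + 1 - k))) ::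
          pvLoopA args args.length (pvScanA args args.length k + 1)) := by
  induction n with
  | zero =>
    intro k hn
    have hk : ¬ k < args.length := by omega
    have hdrop : args.drop k = [] := List.drop_eq_nil_of_le (by omega)
    have hS : pvScanA args args.length k = k := pvScanA_stop args args.length k hk
    have hA' : pvLoopA args args.length (k + 1) = [] := pvLoopA_nil args _ (k + 1) (by omega)
    refine ⟨?_, ?_⟩
    · intro f _
      rw [pvLoopA_nil args f k hk, hdrop]
      rfl
    · intro buf
      simp [hdrop, pvLoopB, hS, hA']
  | succ m ih =>
    intro k hn
    by_cases hk : k < args.length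
    · have hget : args.getD k "" = args[k] := List.getD_eq_getElem args "" hk
      have hdrop : args.drop k = args[k] :: args.drop (k + 1) := List.drop_eq_getElem_cons hk
      have ih1 := (ih (k + 1) (by omega)).1
      have ih2 := (ih (k + 1) (by omega)).2
      constructor
      · -- pvLoopA f k = pvLoopB (drop k) none
        intro f hf
        obtain ⟨f', rfl⟩ : ∃ f', f = f' + 1 := ⟨f - 1, by omega⟩
        rw [pvLoopA]
        rw [hdrop]
        simp only [pvLoopB, if_pos hk, hget]
        by_cases hc : (pvHeadQuote args[k] && !pvLastQuote args[k]) = true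
        · rw [if_pos hc, if_pos hc]
          have hlq : pvLastQuote args[k] = false := by
            cases h' : pvLastQuote args[k] <;> simp [h'] at hc ⊢
          rw [ih2 [args[k]]]
          have hS : pvScanA args args.length k = pvScanA args args.length (k + 1) := by
            rw [pvScanA_step args k hk, if_neg (by rw [hget]; simp [hlq])]
          have hge := pvScanA_ge args args.length (k + 1)
          set S := pvScanA args args.length (k + 1) with hSdef
          have hslice : PySem.List.slice args (some (k : Int)) (some ((S : Int) + 1)) =
              args[k] :: (args.drop (k + 1)).take (S + 1 - (k + 1)) := by
            have hcast : ((S : Int) + 1) = ((S + 1 : Nat) : Int) := by push_cast; ring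
            rw [hcast, PySem.List.slice_natCast, hdrop]
            have h1 : S + 1 - k = (S + 1 - (k + 1)) + 1 := by omega
            rw [h1, List.take_succ_cons]
          rw [hslice]
          rw [pvLoopA_fuel args f' args.length (S + 1) (by omega) (by omega)]
          simp
        · rw [if_neg hc, if_neg hc]
          rw [ih1 f' (by omega)]
      · -- pvLoopB (drop k) (some buf)
        intro buf
        rw [hdrop]
        simp only [pvLoopB]
        by_cases hlq : pvLastQuote args[k] = true
        · rw [if_pos hlq]
          have hS : pvScanA args args.length k = k := by
            rw [pvScanA_step args k hk, if_pos (by rw [hget]; exact hlq)]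
          rw [hS, ih1 args.length (by omega)]
          have h1 : k + 1 - k = 1 := by omega
          rw [h1]
          simp only [List.take_succ_cons, List.take_zero]
        · rw [if_neg hlq]
          have hlq' : pvLastQuote args[k] = false := by
            cases h' : pvLastQuote args[k] <;> simp [h'] at hlq ⊢
          have hS : pvScanA args args.length k = pvScanA args args.length (k + 1) := by
            rw [pvScanA_step args k hk, if_neg (by rw [hget]; simp [hlq'])]
          rw [ih2 (buf ++ [args[k]]), hS]
          have hge := pvScanA_ge args args.length (k + 1)
          set S := pvScanA args args.length (k + 1) with hSdef
          have hseg : (args[k] :: args.drop (k + 1)).take (S + 1 - k) =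
              args[k] :: (args.drop (k + 1)).take (S + 1 - (k + 1)) := by
            have h1 : S + 1 - k = (S + 1 - (k + 1)) + 1 := by omega
            rw [h1, List.take_succ_cons]
          rw [hseg]
          simp
    · have hk' : ¬ k < args.length := hk
      have hdrop : args.drop k = [] := List.drop_eq_nil_of_le (by omega)
      have hS : pvScanA args args.length k = k := pvScanA_stop args args.length k hk'
      have hA' : pvLoopA args args.length (k + 1) = [] := pvLoopA_nil args _ (k + 1) (by omega)
      refine ⟨?_, ?_⟩
      · intro f _
        rw [pvLoopA_nil args f k hk', hdrop]
        rfl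
      · intro buf
        simp [hdrop, pvLoopB, hS, hA']

-- ===== VERDICT (by name: the statement is the Claim_ definition above) =====
theorem combineQuotedArgs_spec : Claim_equal_combineQuotedArgs := by
  intro args _ _
  unfold Spec_combineQuotedArgs combineQuotedArgs combineQuotedArgs_alt
  have := (pv_main args args.length 0 (by omega)).1 args.length (by omega)
  simpa using this
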